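-- pv_equiv track=rewrite | github.com/st01k/discrete-math | xor.py | formatSet
-- ===== SOURCE A (Python) =====
-- def formatSet(label, set):
--     temp = '\n' + label + ':\n'
--     for i, item in enumerate(set):
--         if i % 10 == 0: temp += '\n'
--         temp += '{:>5}'.format(str(item))
--     if len(set) == 0: temp += '\n\t\tEmpty Set'
--     temp += '\n'
--     return temp
-- ===== SOURCE B (Python) =====
-- def formatSet(label, set):
--     cells = ['{:>5}'.format(str(item)) for item in set]
--     rows = ''.join('\n' + ''.join(cells[i:i + 10]) for i in range(0, len(cells), 10))
--     empty = '\n\t\tEmpty Set' if not cells else ''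
--     return '\n' + label + ':\n' + rows + empty + '\n'
-- ===== Notes on version B (the rewrite author's own statement) =====
-- stated objective: alternative
-- what changed: B replaces A's single flat loop with an i%10 newline test and string accumulation by a build-then-group pipeline: map items to 5-wide cells, split into chunks of 10, emit each chunk as one '\n'-prefixed row, and concatenate header, rows, empty-set marker and trailing newline.
import Mathlib
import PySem

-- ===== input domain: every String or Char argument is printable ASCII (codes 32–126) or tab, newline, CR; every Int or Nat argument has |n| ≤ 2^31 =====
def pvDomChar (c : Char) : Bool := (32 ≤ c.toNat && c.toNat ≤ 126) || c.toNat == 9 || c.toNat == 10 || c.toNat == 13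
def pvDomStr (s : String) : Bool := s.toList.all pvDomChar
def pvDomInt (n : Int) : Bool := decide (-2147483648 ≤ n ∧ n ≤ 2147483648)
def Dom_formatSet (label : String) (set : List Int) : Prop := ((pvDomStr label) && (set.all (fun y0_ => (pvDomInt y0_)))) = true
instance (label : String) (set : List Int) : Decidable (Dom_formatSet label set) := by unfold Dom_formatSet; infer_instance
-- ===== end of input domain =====

-- B builds the row structure explicitly (map to 5-wide cells, then group into chunks of 10,
-- each emitted as '\n' ++ joined chunk) instead of A's single flat loop with an i%10 newline test.


-- ===== PORT A =====
-- '{:>5}'.format(str(item)) : right-justify str(item) to width 5 with spaces (exact for width-5 ASCII)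
def fmtCell (n : Int) : List Char :=
  List.replicate (5 - (PySem.Int.toChars n).length) ' ' ++ PySem.Int.toChars n

def formatSet (label : String) (set : List Int) : String :=
  let temp := '\n' :: label.toList ++ [':', '\n']
  let temp := (PySem.List.enumerate set 0).foldl
    (fun t p => (if PySem.Int.mod p.1 10 == 0 then t ++ ['\n'] else t) ++ fmtCell p.2) temp
  let temp := if set.length == 0 then temp ++ "\n\t\tEmpty Set".toList else temp
  String.ofList (temp ++ ['\n'])

-- ===== PORT B =====
-- the generator over range(0, len, 10) with slices cells[i:i+10], as structural recursion by 10
def rows10 : List (List Char) → List Char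
  | [] => []
  | c :: cs => '\n' :: (c ++ (cs.take 9).flatten) ++ rows10 (cs.drop 9)
termination_by cs => cs.length
decreasing_by simp

def formatSet_alt (label : String) (set : List Int) : String :=
  let cells := set.map fmtCell
  let rows := rows10 cells
  let empty := if cells.isEmpty then "\n\t\tEmpty Set".toList else []
  String.ofList ('\n' :: label.toList ++ [':', '\n'] ++ rows ++ empty ++ ['\n'])

-- ===== PRECONDITION & SPEC =====
def Spec_formatSet (label : String) (set : List Int) (out : String) : Prop := out = formatSet_alt label set
instance (label : String) (set : List Int) (out : String) : Decidable (Spec_formatSet label set out) := by unfold Spec_formatSet; infer_instance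

-- ===== CLAIM (what is proved, stated in full; the proofs are below) =====
def Claim_equal_formatSet : Prop := ∀ (label : String) (set : List Int), Dom_formatSet label set → Spec_formatSet label set (formatSet label set)

-- ===== LEMMAS AND PROOFS =====

-- A's loop body, named for the proofs
def loopF (t : List Char) (p : Int × Int) : List Char :=
  (if PySem.Int.mod p.1 10 == 0 then t ++ ['\n'] else t) ++ fmtCell p.2

lemma loopF_eq (set : List Int) (t : List Char) :
    (PySem.List.enumerate set 0).foldl
      (fun t p => (if PySem.Int.mod p.1 10 == 0 then t ++ ['\n'] else t) ++ fmtCell p.2) t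
    = (PySem.List.enumerate set 0).foldl loopF t := rfl

-- the core invariant: A's indexed loop produces B's row structure
lemma loop_rows (xs : List Int) : ∀ (n : Nat) (t : List Char),
    (PySem.List.enumerate xs (n : Int)).foldl loopF t =
      if n % 10 = 0 then t ++ rows10 (xs.map fmtCell)
      else t ++ ((xs.take (10 - n % 10)).map fmtCell).flatten
             ++ rows10 ((xs.drop (10 - n % 10)).map fmtCell) := by
  induction xs with
  | nil => intro n t; simp [PySem.List.enumerate_nil, rows10]
  | cons x xs ih =>
    intro n t
    rw [PySem.List.enumerate_cons, List.foldl_cons]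
    have hstep : loopF t ((n : Int), x) =
        (if n % 10 = 0 then t ++ ['\n'] else t) ++ fmtCell x := by
      have hd : ((10 : Int) ∣ (n : Int)) ↔ n % 10 = 0 := by omega
      by_cases h : n % 10 = 0 <;> simp [loopF, hd, h]
    have hcast : ((n : Int) + 1) = ((n + 1 : Nat) : Int) := by push_cast; ring
    rw [hstep, hcast, ih (n + 1)]
    by_cases h0 : n % 10 = 0
    · have h1 : (n + 1) % 10 = 1 := by omega
      simp [h0, h1, rows10, List.map_take, List.map_drop, List.append_assoc]
    · by_cases h9 : n % 10 = 9
      · have h1 : (n + 1) % 10 = 0 := by omega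
        simp [h9, h1, List.append_assoc]
      · have h1 : (n + 1) % 10 = n % 10 + 1 := by omega
        have hne : (n + 1) % 10 ≠ 0 := by omega
        have hr : n % 10 < 9 := by omega
        have htk : 10 - n % 10 = (10 - (n + 1) % 10) + 1 := by omega
        simp only [h0, h1, htk]
        simp [List.take_succ_cons, List.drop_succ_cons, List.append_assoc]

-- ===== VERDICT (by name: the statement is the Claim_ definition above) =====
theorem formatSet_spec : Claim_equal_formatSet := by
  intro label set _
  show formatSet label set = formatSet_alt label set
  simp only [formatSet, formatSet_alt]
  rw [loopF_eq]
  have h := loop_rows set 0 ('\n' :: label.toList ++ [':', '\n'])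
  simp only [Nat.zero_mod] at h
  rw [show ((0 : Nat) : Int) = (0 : Int) from rfl] at h
  rw [h]
  cases set with
  | nil => simp
  | cons x xs => simp [List.append_assoc]
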